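-- pv_equiv track=rewrite | github.com/kageback/colorwords | com_game.py | compute_ranges
-- ===== SOURCE A (Python) =====
-- def compute_ranges(V):
--     lex = {}
--     for n in V.keys():
--         if not V[n] in lex.keys():
--             lex[V[n]] = [n]
--         else:
--             lex[V[n]] += [n]
--     ranges = {}
--     for w in lex.keys():
--         ranges[w] = []
--         state = 'out'
--         for n in lex[w]:
--             if state == 'out':
--                 range_start = n
--                 prev = n
--                 state = 'in'
--             elif state == 'in':
--                 if prev + 1 != n:
--                     ranges[w] += [(range_start, prev)]
--                     range_start = n
--                 prev = n
--         ranges[w] += [(range_start, prev)]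
--     return ranges
-- ===== SOURCE B (Python) =====
-- def compute_ranges(V):
--     lex = {}
--     for n, w in V.items():
--         lex.setdefault(w, []).append(n)
--     ranges = {}
--     for w, ns in lex.items():
--         starts = [n for p, n in zip([None] + ns, ns) if p is None or p + 1 != n]
--         ends = [n for n, q in zip(ns, ns[1:] + [None]) if q is None or q != n + 1]
--         ranges[w] = list(zip(starts, ends))
--     return ranges
-- ===== Notes on version B (the rewrite author's own statement) =====
-- stated objective: alternative
-- what changed: Grouping uses setdefault/append, and the run-collapsing drops A's sequential 'out'/'in' state machine entirely: B detects run boundaries declaratively by zipping each group with its shifted self (starts = elements not preceded by value-1, ends = elements not followed by value+1) and pairs them with zip(starts, ends).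
import Mathlib
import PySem

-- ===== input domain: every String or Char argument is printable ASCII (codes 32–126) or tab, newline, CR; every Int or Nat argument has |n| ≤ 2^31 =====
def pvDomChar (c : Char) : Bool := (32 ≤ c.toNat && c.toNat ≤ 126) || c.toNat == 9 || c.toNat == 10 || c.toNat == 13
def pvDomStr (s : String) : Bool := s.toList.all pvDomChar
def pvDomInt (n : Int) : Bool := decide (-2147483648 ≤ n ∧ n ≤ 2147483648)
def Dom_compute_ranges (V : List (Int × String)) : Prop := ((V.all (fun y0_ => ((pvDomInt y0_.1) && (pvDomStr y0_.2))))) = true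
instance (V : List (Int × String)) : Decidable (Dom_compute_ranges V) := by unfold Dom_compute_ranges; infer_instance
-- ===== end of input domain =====

-- B replaces A's sequential 'out'/'in' state machine by a declarative boundary detection:
-- each group is zipped with its shifted self to pick out run starts and run ends, which are
-- then paired with zip; objective: alternative. Equivalence of the RETURN value is proved for
-- every V whose keys are distinct (a Python dict cannot hold duplicate keys).

-- ===== PORT A =====
-- loop body of 'for n in lex[w]': state.2 = none ↔ state == 'out'; some (range_start, prev) ↔ 'in'
def crA_step (st : List (Int × Int) × Option (Int × Int)) (n : Int) :
    List (Int × Int) × Option (Int × Int) :=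
  match st.2 with
  | none => (st.1, some (n, n))
  | some (s, p) => if p + 1 ≠ n then (st.1 ++ [(s, p)], some (n, n)) else (st.1, some (s, n))

-- the inner loop over lex[w] plus the trailing 'ranges[w] += [(range_start, prev)]'.
-- ranges[w] is only ever extended at the key w being processed, so the port accumulates that
-- list locally (st.1) and stores it once; with the group empty A's trailing line would raise
-- NameError, but groups built by A are never empty, so the none-branch below is unreachable.
def crA_run (g : List Int) : List (Int × Int) :=
  let st := g.foldl crA_step ([], none)
  match st.2 with
  | none => st.1
  | some sp => st.1 ++ [sp]

def compute_ranges (V : List (Int × String)) : List (String × List (Int × Int)) :=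
  let lex : PySem.Dict String (List Int) :=
    V.foldl (fun lex nw =>
      let w := PySem.Dict.getD (PySem.Dict.mk V) nw.1 ""   -- V[n] (keys distinct: first match = the dict's value)
      if ((PySem.Dict.keys lex).contains w) = false then PySem.Dict.insert lex w [nw.1]
      else PySem.Dict.insert lex w (PySem.Dict.getD lex w [] ++ [nw.1])) PySem.Dict.empty
  let ranges : PySem.Dict String (List (Int × Int)) :=
    (PySem.Dict.keys lex).foldl
      (fun ranges w => PySem.Dict.insert ranges w (crA_run (PySem.Dict.getD lex w []))) PySem.Dict.empty
  ranges.items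

-- ===== PORT B =====
-- [n for p, n in zip([None] + ns, ns) if p is None or p + 1 != n]
def crB_starts (ns : List Int) : List Int :=
  ((List.zip ((none : Option Int) :: ns.map some) ns).filter
    (fun p => match p.1 with | none => true | some q => decide (q + 1 ≠ p.2))).map Prod.snd

-- [n for n, q in zip(ns, ns[1:] + [None]) if q is None or q != n + 1]
def crB_ends (ns : List Int) : List Int :=
  ((List.zip ns ((ns.drop 1).map some ++ [none])).filter
    (fun p => match p.2 with | none => true | some q => decide (q ≠ p.1 + 1))).map Prod.fst

def compute_ranges_alt (V : List (Int × String)) : List (String × List (Int × Int)) :=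
  let lex : PySem.Dict String (List Int) :=
    V.foldl (fun lex nw => PySem.Dict.modify lex nw.2 [] (· ++ [nw.1])) PySem.Dict.empty
  lex.items.map (fun p => (p.1, List.zip (crB_starts p.2) (crB_ends p.2)))

-- ===== PRECONDITION & SPEC =====
-- Pre_ excludes association lists with a repeated key: they do not denote a Python dict
-- (dict construction collapses duplicates), so A's argument V never contains them.
def Pre_compute_ranges (V : List (Int × String)) : Prop := (V.map Prod.fst).Nodup
instance (V : List (Int × String)) : Decidable (Pre_compute_ranges V) := by
  unfold Pre_compute_ranges; infer_instance

def pvWitness_compute_ranges : (List (Int × String)) := [(0, "a"), (1, "a"), (3, "b"), (2, "a")]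

def Spec_compute_ranges (V : List (Int × String)) (out : List (String × List (Int × Int))) : Prop := out = compute_ranges_alt V
instance (V : List (Int × String)) (out : List (String × List (Int × Int))) : Decidable (Spec_compute_ranges V out) := by unfold Spec_compute_ranges; infer_instance

-- ===== CLAIM (what is proved, stated in full; the proofs are below) =====
def Claim_equal_compute_ranges : Prop := ∀ (V : List (Int × String)), Dom_compute_ranges V → Pre_compute_ranges V → Spec_compute_ranges V (compute_ranges V)

-- ===== LEMMAS AND PROOFS =====

-- proof-side recursive characterisations of B's two boundary comprehensions, threaded by the
-- previous element p
def crS (p : Int) : List Int → List Int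
  | [] => []
  | n :: t => if p + 1 = n then crS n t else n :: crS n t

def crE (p : Int) : List Int → List Int
  | [] => [p]
  | n :: t => if p + 1 = n then crE n t else p :: crE n t

lemma crB_starts_aux (t : List Int) : ∀ p : Int,
    ((List.zip ((some p) :: t.map some) t).filter
      (fun q => match q.1 with | none => true | some r => decide (r + 1 ≠ q.2))).map Prod.snd
    = crS p t := by
  induction t with
  | nil => intro p; simp [crS]
  | cons n t ih =>
    intro p
    have ih' := ih n
    simp [List.zip] at ih'
    by_cases h : p + 1 = n <;>
      simp [crS, h, List.zip, ih']

lemma crB_starts_cons (n : Int) (t : List Int) : crB_starts (n :: t) = n :: crS n t := by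
  simp only [crB_starts, List.map_cons, List.zip, List.zipWith, List.filter, List.map]
  exact congrArg (n :: ·) (crB_starts_aux t n)

lemma crB_ends_aux (t : List Int) : ∀ p : Int,
    ((List.zip (p :: t) (t.map some ++ [none])).filter
      (fun q => match q.2 with | none => true | some r => decide (r ≠ q.1 + 1))).map Prod.fst
    = crE p t := by
  induction t with
  | nil => intro p; simp [crE]
  | cons n t ih =>
    intro p
    have ih' := ih n
    simp [List.zip] at ih'
    by_cases h : p + 1 = n
    · have h' : ¬ n ≠ p + 1 := by omega
      simp [crE, h, List.zip, ih']
    · have h' : n ≠ p + 1 := by omega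
      simp [crE, h, h', List.zip, ih']

lemma crB_ends_cons (n : Int) (t : List Int) : crB_ends (n :: t) = crE n t := by
  simpa [crB_ends] using crB_ends_aux t n

-- A's state machine from state 'in' (s,p), flushed at the end, equals zip of the boundary lists
lemma crA_run_aux (t : List Int) : ∀ (acc : List (Int × Int)) (s p : Int),
    (match (t.foldl crA_step (acc, some (s, p))).2 with
     | none => (t.foldl crA_step (acc, some (s, p))).1
     | some sp => (t.foldl crA_step (acc, some (s, p))).1 ++ [sp])
    = acc ++ List.zip (s :: crS p t) (crE p t) := by
  induction t with
  | nil => intro acc s p; simp [crS, crE]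
  | cons n t ih =>
    intro acc s p
    simp only [List.foldl_cons]
    have hA : crA_step (acc, some (s, p)) n =
        if p + 1 = n then (acc, some (s, n)) else (acc ++ [(s, p)], some (n, n)) := by
      by_cases h : p + 1 = n <;> simp [crA_step, h]
    rw [hA]
    by_cases h : p + 1 = n
    · simp only [h, crS, crE]
      exact ih acc s n
    · simp only [crS, crE, if_neg h]
      rw [ih (acc ++ [(s, p)]) n n]
      simp [List.zip]
  
lemma crA_eq_crB (g : List Int) : crA_run g = List.zip (crB_starts g) (crB_ends g) := by
  cases g with
  | nil => rfl
  | cons n t =>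
    rw [crB_starts_cons, crB_ends_cons]
    simp only [crA_run, List.foldl_cons]
    have h1 : crA_step ([], none) n = ([], some (n, n)) := rfl
    rw [h1]
    simpa using crA_run_aux t [] n n

-- with distinct keys, V[n] looked up in the dict V is the value paired with n
lemma lookup_self (V : List (Int × String)) (hnd : (V.map Prod.fst).Nodup)
    (nw : Int × String) (h : nw ∈ V) :
    PySem.Dict.getD (PySem.Dict.mk V) nw.1 "" = nw.2 := by
  have hk : (PySem.Dict.mk V).keys.Nodup := hnd
  have : (PySem.Dict.mk V).get? nw.1 = some nw.2 :=
    PySem.Dict.get?_of_mem_items (PySem.Dict.mk V) (by simpa using h) hk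
  simp [PySem.Dict.getD, this]

-- the two grouping loops build the same dict
lemma lex_eq (V : List (Int × String)) (hnd : (V.map Prod.fst).Nodup) :
    V.foldl (fun lex nw =>
      let w := PySem.Dict.getD (PySem.Dict.mk V) nw.1 ""
      if ((PySem.Dict.keys lex).contains w) = false then PySem.Dict.insert lex w [nw.1]
      else PySem.Dict.insert lex w (PySem.Dict.getD lex w [] ++ [nw.1]))
      (PySem.Dict.empty : PySem.Dict String (List Int)) =
    V.foldl (fun lex nw => PySem.Dict.modify lex nw.2 [] (· ++ [nw.1])) PySem.Dict.empty := by
  apply PySem.List.foldl_congr_mem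
  intro lex nw hmem
  dsimp only
  rw [lookup_self V hnd nw hmem]
  by_cases h : (PySem.Dict.keys lex).contains nw.2 = true
  · rw [h, if_neg (by simp)]
    rfl
  · rw [Bool.not_eq_true] at h
    have hc : lex.contains nw.2 = false := by
      rw [PySem.Dict.contains_eq_decide_mem_keys]
      simpa using h
    have hg : PySem.Dict.getD lex nw.2 [] = [] := PySem.Dict.getD_of_not_contains lex [] hc
    rw [h, if_pos rfl, PySem.Dict.modify, hg]
    rfl

-- ===== VERDICT (by name: the statement is the Claim_ definition above) =====
theorem compute_ranges_spec : Claim_equal_compute_ranges := by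
  intro V _ hpre
  unfold Spec_compute_ranges compute_ranges compute_ranges_alt
  rw [lex_eq V hpre]
  set lex := V.foldl (fun lex nw => PySem.Dict.modify lex nw.2 [] (· ++ [nw.1]))
      (PySem.Dict.empty : PySem.Dict String (List Int)) with hlex
  have hnd : lex.keys.Nodup := by
    rw [hlex]
    exact PySem.Dict.nodup_keys_foldl_modify_key V (fun nw => nw.2) []
      (fun _ nw v => v ++ [nw.1]) PySem.Dict.empty (by simp [PySem.Dict.empty])
  have hfresh : (List.foldl (fun ranges w => PySem.Dict.insert ranges w (crA_run (PySem.Dict.getD lex w [])))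
      (PySem.Dict.empty : PySem.Dict String (List (Int × Int))) lex.keys).items =
      lex.keys.map (fun w => (w, crA_run (PySem.Dict.getD lex w []))) := by
    simpa using PySem.Dict.items_foldl_insert_fresh lex.keys (fun w => w)
      (fun w => crA_run (PySem.Dict.getD lex w []))
      (PySem.Dict.empty : PySem.Dict String (List (Int × Int)))
      (fun a _ => by simp [PySem.Dict.empty, PySem.Dict.contains]) (by simpa using hnd)
  rw [hfresh]
  show _ = List.map (fun p => (p.1, List.zip (crB_starts p.2) (crB_ends p.2))) lex.items
  rw [PySem.Dict.items_eq_map_keys lex hnd ([] : List Int), List.map_map]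
  refine List.map_congr_left (fun w _ => ?_)
  simp [Function.comp, crA_eq_crB]
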